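-- pv_equiv track=rewrite | github.com/arunkamaraj/python_learning_2019 | sorting_algo/shell_sort.py | do_insertion_sort
-- ===== SOURCE A (Python) =====
-- def do_insertion_sort(gap,n,shell_data):
--     for i in range(gap,n):
--         temp = shell_data[i]
--         while i-gap >=0 and shell_data[i-gap] > temp:
--             shell_data[i] = shell_data[i-gap]
--             i-=gap
--         shell_data[i] = temp
--
--     return shell_data
-- ===== SOURCE B (Python) =====
-- def do_insertion_sort(gap, n, shell_data):
--     # Sort each gap-strided residue class via Python's built-in sorted on a
--     # slice, instead of an interleaved gapped insertion pass (same in-place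
--     # mutation of shell_data as the original).
--     if gap < n:
--         for c in range(gap):
--             shell_data[c:n:gap] = sorted(shell_data[c:n:gap])
--     return shell_data
-- ===== Notes on version B (the rewrite author's own statement) =====
-- stated objective: idiomatic
-- what changed: B replaces the interleaved gapped insertion pass by per-residue-class slice sorting: for each offset c < gap it extracts the strided slice shell_data[c:n:gap], sorts it with the built-in sorted (timsort), and assigns it back, instead of A's single left-to-right sweep shifting elements with an inner while loop.
-- outside the precondition, e.g. on do_insertion_sort(-1, 0, [6, -1, 0]): A returns [0, -1, 6], B returns [6, -1, 0]; on do_insertion_sort(-2, 1, [3, 1, 2]): A raises IndexError, B returns [3, 1, 2]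
import Mathlib
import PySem

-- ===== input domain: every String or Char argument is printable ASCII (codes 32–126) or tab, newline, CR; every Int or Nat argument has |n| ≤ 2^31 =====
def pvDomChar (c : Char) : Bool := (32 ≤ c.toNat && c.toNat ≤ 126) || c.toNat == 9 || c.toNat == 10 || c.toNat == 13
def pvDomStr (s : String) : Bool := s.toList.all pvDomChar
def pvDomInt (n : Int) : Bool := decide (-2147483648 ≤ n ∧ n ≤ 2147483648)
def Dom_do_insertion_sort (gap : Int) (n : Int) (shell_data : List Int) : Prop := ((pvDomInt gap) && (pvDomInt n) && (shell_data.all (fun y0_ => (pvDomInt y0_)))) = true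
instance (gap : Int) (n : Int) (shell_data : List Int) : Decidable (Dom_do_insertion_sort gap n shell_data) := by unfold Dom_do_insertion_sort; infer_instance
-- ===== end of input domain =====

-- B sorts each gap-strided residue class with the built-in sorted on a slice,
-- instead of A's single interleaved gapped insertion pass (idiomatic rewrite).
-- Both Pythons mutate shell_data in place identically; the theorems are about the
-- returned (= final) list.


-- ===== PORT A =====
-- Int-indexed read/write; exact for 0 ≤ k < len, the only indices either Python
-- reaches on inputs satisfying Pre_ (negative indices would wrap in Python).
def pvGetI (d : List Int) (k : Int) : Int := if 0 ≤ k then d.getD k.toNat 0 else 0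
def pvSetI (d : List Int) (k : Int) (v : Int) : List Int := if 0 ≤ k then d.set k.toNat v else d

-- the inner 'while i-gap >= 0 and shell_data[i-gap] > temp' loop; fuel d.length
-- suffices on every input satisfying Pre_ (the index drops by gap ≥ 1 each turn,
-- staying ≥ 0, and with gap = 0 the guard is false at once).
def pvWhileA (gap temp : Int) : Nat → Int → List Int → Int × List Int
  | 0, i, d => (i, d)
  | fuel+1, i, d =>
    if 0 ≤ i - gap ∧ temp < pvGetI d (i - gap) then
      pvWhileA gap temp fuel (i - gap) (pvSetI d i (pvGetI d (i - gap)))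
    else (i, d)

def pvBodyA (gap : Int) (d : List Int) (i : Int) : List Int :=
  let temp := pvGetI d i
  let r := pvWhileA gap temp d.length i d
  pvSetI r.2 r.1 temp

def do_insertion_sort (gap : Int) (n : Int) (shell_data : List Int) : List Int :=
  (PySem.List.pyRange gap n 1).foldl (pvBodyA gap) shell_data

-- ===== PORT B =====
-- the index sequence start, start+step, … of the extended slice d[start:stop:step],
-- exact for start ≥ 0 and step ≥ 1 (the only slices Source B takes); stop is already
-- clipped to len d by the caller, so fuel len d + 1 always suffices.
def pvStrideIdx (step stop : Int) : Nat → Int → List Int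
  | 0, _ => []
  | f+1, j => if j < stop then j :: pvStrideIdx step stop f (j + step) else []

-- shell_data[c:n:gap] = sorted(shell_data[c:n:gap]) : read the strided slice,
-- sort it with the built-in sorted, write it back position by position.
def pvSliceSortAssign (d : List Int) (c n g : Int) : List Int :=
  let idxs := pvStrideIdx g (min n (d.length : Int)) (d.length + 1) c
  let vals := PySem.List.sorted (idxs.map (pvGetI d)) (fun x => x) false
  (idxs.zip vals).foldl (fun e p => pvSetI e p.1 p.2) d

def do_insertion_sort_alt (gap : Int) (n : Int) (shell_data : List Int) : List Int :=
  if gap < n then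
    (PySem.List.pyRange 0 gap 1).foldl (fun d c => pvSliceSortAssign d c n gap) shell_data
  else shell_data

-- ===== PRECONDITION & SPEC =====
-- Pre_ excludes negative gap with a non-empty loop range (gap < n), where Python's
-- negative-index wraparound makes A's occasional non-raising result an accident
-- (A raises IndexError on most such inputs), and gap < n > len(shell_data), where
-- A raises IndexError.
def Pre_do_insertion_sort (gap : Int) (n : Int) (shell_data : List Int) : Prop :=
  (0 ≤ gap ∧ n ≤ (shell_data.length : Int)) ∨ n ≤ gap
instance (gap : Int) (n : Int) (shell_data : List Int) : Decidable (Pre_do_insertion_sort gap n shell_data) := by unfold Pre_do_insertion_sort; infer_instance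

def pvWitness_do_insertion_sort : Int × Int × List Int := (2, 4, [4, 1, 3, 2])

def Spec_do_insertion_sort (gap : Int) (n : Int) (shell_data : List Int) (out : List Int) : Prop := out = do_insertion_sort_alt gap n shell_data
instance (gap : Int) (n : Int) (shell_data : List Int) (out : List Int) : Decidable (Spec_do_insertion_sort gap n shell_data out) := by unfold Spec_do_insertion_sort; infer_instance

-- ===== CLAIM =====
def Claim_equal_do_insertion_sort : Prop := ∀ (gap : Int) (n : Int) (shell_data : List Int), Dom_do_insertion_sort gap n shell_data → Pre_do_insertion_sort gap n shell_data → Spec_do_insertion_sort gap n shell_data (do_insertion_sort gap n shell_data)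

-- ===== LEMMAS AND PROOFS =====

theorem pv_length_setI (d : List Int) (k v : Int) : (pvSetI d k v).length = d.length := by
  unfold pvSetI; split <;> simp

theorem pv_getI_setI (d : List Int) (m v k : Int) :
    pvGetI (pvSetI d m v) k =
      if k = m ∧ 0 ≤ k ∧ k < (d.length : Int) then v else pvGetI d k := by
  unfold pvGetI pvSetI
  by_cases hm : 0 ≤ m
  · by_cases hk : 0 ≤ k
    · simp only [hm, hk, if_true]
      by_cases hkm : k = m
      · subst hkm
        by_cases hlt : k < (d.length : Int)
        · have hnat : k.toNat < d.length := by omega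
          simp [hlt, List.getD, hnat]
        · have hnat : ¬ k.toNat < d.length := by omega
          simp only [hlt, and_false, if_false]
          simp [List.getD, hnat]
      · have hne : m.toNat ≠ k.toNat := by omega
        simp [hkm, List.getD, List.getElem?_set_ne hne]
    · simp [hk]
  · have : ¬ (k = m ∧ 0 ≤ k ∧ k < (d.length : Int)) := by omega
    simp [hm, this]

theorem pv_ext (d₁ d₂ : List Int) (hlen : d₁.length = d₂.length)
    (h : ∀ k : Int, pvGetI d₁ k = pvGetI d₂ k) : d₁ = d₂ := by
  apply List.ext_getElem hlen
  intro m h₁ h₂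
  have := h (m : Int)
  unfold pvGetI at this
  simp only [Int.natCast_nonneg, if_true, Int.toNat_natCast] at this
  simpa [List.getD, List.getElem?_eq_getElem, h₁, h₂] using this

theorem pv_sub_emod (a g : Int) : (a - g) % g = a % g := Int.sub_emod_right a g
theorem pv_add_emod (a g : Int) : (a + g) % g = a % g := by
  simpa using Int.add_mul_emod_self_left a g 1

-- two same-residue integers at distance less than g are ordered
theorem pv_class_le (g a b : Int) (hg : 1 ≤ g) (hmod : a % g = b % g) (h : b - g < a) :
    b ≤ a := by
  have hdvd : g ∣ b - a := Int.ModEq.dvd hmod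
  by_contra hab
  have := Int.le_of_dvd (by omega) hdvd
  omega

-- a nonnegative integer is at least its residue
theorem pv_mod_le (g a c : Int) (hg : 1 ≤ g) (hc0 : 0 ≤ c) (hcg : c < g)
    (ha : 0 ≤ a) (hmod : a % g = c) : c ≤ a := by
  have hd := Int.emod_def a g
  have hq : 0 ≤ a / g := Int.ediv_nonneg ha (by omega)
  have : 0 ≤ g * (a / g) := mul_nonneg (by omega) hq
  omega

-- == invariants of the inner while loop ==

theorem pvWhileA_len (g t : Int) : ∀ (f : Nat) (i : Int) (d : List Int),
    (pvWhileA g t f i d).2.length = d.length := by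
  intro f
  induction f with
  | zero => intro i d; rfl
  | succ f ih =>
    intro i d
    simp only [pvWhileA]
    split
    · rw [ih, pv_length_setI]
    · rfl

theorem pvWhileA_cls (g t : Int) : ∀ (f : Nat) (i : Int) (d : List Int),
    (pvWhileA g t f i d).1 % g = i % g := by
  intro f
  induction f with
  | zero => intro i d; rfl
  | succ f ih =>
    intro i d
    simp only [pvWhileA]
    split
    · rw [ih, pv_sub_emod]
    · rfl

theorem pvWhileA_off (g t : Int) : ∀ (f : Nat) (i : Int) (d : List Int) (k : Int),
    k % g ≠ i % g → pvGetI (pvWhileA g t f i d).2 k = pvGetI d k := by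
  intro f
  induction f with
  | zero => intro i d k _; rfl
  | succ f ih =>
    intro i d k hk
    simp only [pvWhileA]
    split
    · rw [ih _ _ _ (by rw [pv_sub_emod]; exact hk)]
      rw [pv_getI_setI]
      have : k ≠ i := fun h => hk (by rw [h])
      simp [this]
    · rfl

theorem pvBodyA_len (g : Int) (d : List Int) (i : Int) :
    (pvBodyA g d i).length = d.length := by
  unfold pvBodyA
  rw [pv_length_setI, pvWhileA_len]

theorem pvBodyA_off (g : Int) (d : List Int) (i k : Int) (hk : k % g ≠ i % g) :
    pvGetI (pvBodyA g d i) k = pvGetI d k := by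
  unfold pvBodyA
  rw [pv_getI_setI]
  have h1 : (pvWhileA g (pvGetI d i) d.length i d).1 % g = i % g := pvWhileA_cls _ _ _ _ _
  have : k ≠ (pvWhileA g (pvGetI d i) d.length i d).1 := by
    intro h; exact hk (by rw [h, h1])
  simp only [this, false_and, if_false]
  exact pvWhileA_off _ _ _ _ _ _ hk

-- the while loop looks only at entries of i's residue class
theorem pvWhileA_sim (g t : Int) : ∀ (f : Nat) (i : Int) (d₁ d₂ : List Int),
    d₁.length = d₂.length →
    (∀ k : Int, k % g = i % g → pvGetI d₁ k = pvGetI d₂ k) →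
    (pvWhileA g t f i d₁).1 = (pvWhileA g t f i d₂).1 ∧
    (∀ k : Int, k % g = i % g →
      pvGetI (pvWhileA g t f i d₁).2 k = pvGetI (pvWhileA g t f i d₂).2 k) := by
  intro f
  induction f with
  | zero => intro i d₁ d₂ _ h; exact ⟨rfl, h⟩
  | succ f ih =>
    intro i d₁ d₂ hlen h
    have hread : pvGetI d₁ (i - g) = pvGetI d₂ (i - g) := h _ (pv_sub_emod i g)
    simp only [pvWhileA]
    by_cases hc : 0 ≤ i - g ∧ t < pvGetI d₁ (i - g)
    · have hc₂ : 0 ≤ i - g ∧ t < pvGetI d₂ (i - g) := by rw [← hread]; exact hc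
      rw [if_pos hc, if_pos hc₂]
      have hig : (i - g) % g = i % g := pv_sub_emod i g
      rw [← hig]
      apply ih
      · rw [pv_length_setI, pv_length_setI, hlen]
      · intro k hk
        rw [pv_getI_setI, pv_getI_setI, hlen, hread]
        split
        · rfl
        · exact h k (hk.trans hig)
    · have hc₂ : ¬ (0 ≤ i - g ∧ t < pvGetI d₂ (i - g)) := by rw [← hread]; exact hc
      rw [if_neg hc, if_neg hc₂]
      exact ⟨rfl, h⟩

theorem pvBodyA_sim (g : Int) (i : Int) (d₁ d₂ : List Int)
    (hlen : d₁.length = d₂.length)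
    (h : ∀ k : Int, k % g = i % g → pvGetI d₁ k = pvGetI d₂ k) :
    ∀ k : Int, k % g = i % g → pvGetI (pvBodyA g d₁ i) k = pvGetI (pvBodyA g d₂ i) k := by
  intro k hk
  unfold pvBodyA
  have htemp : pvGetI d₁ i = pvGetI d₂ i := h i rfl
  have hfuel : d₂.length = d₁.length := hlen.symm
  rw [hfuel, ← htemp]
  obtain ⟨h1, h2⟩ := pvWhileA_sim g (pvGetI d₁ i) d₁.length i d₁ d₂ hlen h
  rw [pv_getI_setI, pv_getI_setI, h1, pvWhileA_len, pvWhileA_len]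
  have hcast : (d₁.length : Int) = (d₂.length : Int) := by rw [hlen]
  rw [hcast]
  split
  · rfl
  · exact h2 k hk

-- bodies of different residue classes commute
theorem pvBodyA_comm (g : Int) (i j : Int) (d : List Int) (hij : i % g ≠ j % g) :
    pvBodyA g (pvBodyA g d j) i = pvBodyA g (pvBodyA g d i) j := by
  apply pv_ext
  · rw [pvBodyA_len, pvBodyA_len, pvBodyA_len, pvBodyA_len]
  · intro k
    by_cases hki : k % g = i % g
    · have hkj : k % g ≠ j % g := by rw [hki]; exact hij
      have step1 : pvGetI (pvBodyA g (pvBodyA g d j) i) k = pvGetI (pvBodyA g d i) k := by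
        apply pvBodyA_sim g i _ _ (by rw [pvBodyA_len])
        · intro k' hk'
          exact pvBodyA_off g d j k' (by rw [hk']; exact hij)
        · exact hki
      rw [step1, pvBodyA_off g _ j k hkj]
    · by_cases hkj : k % g = j % g
      · have step1 : pvGetI (pvBodyA g (pvBodyA g d i) j) k = pvGetI (pvBodyA g d j) k := by
          apply pvBodyA_sim g j _ _ (by rw [pvBodyA_len])
          · intro k' hk'
            exact pvBodyA_off g d i k' (by rw [hk']; exact fun hh => hij hh.symm)
          · exact hkj
        rw [step1, pvBodyA_off g _ i k hki]
      · rw [pvBodyA_off g _ i k hki, pvBodyA_off g _ j k hkj,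
            pvBodyA_off g _ j k hkj, pvBodyA_off g _ i k hki]

-- fold over xs ++ a :: ys = apply a last, when a's class differs from every y's
theorem pv_foldl_middle (g a : Int) (ys : List Int) (hys : ∀ y ∈ ys, y % g ≠ a % g) :
    ∀ (e : List Int), List.foldl (pvBodyA g) (pvBodyA g e a) ys
      = pvBodyA g (List.foldl (pvBodyA g) e ys) a := by
  induction ys with
  | nil => intro e; rfl
  | cons y ys ih =>
    intro e
    simp only [List.foldl_cons]
    rw [pvBodyA_comm g y a e (hys y (by simp))]
    exact ih (fun z hz => hys z (by simp [hz])) _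

-- == the fuel-based index progression and its clean fuel-free twin ==

theorem pvStrideIdx_nil (g n : Int) (f : Nat) (j : Int) (h : ¬ j < n) :
    pvStrideIdx g n f j = [] := by
  cases f <;> simp [pvStrideIdx, h]

theorem pvStrideIdx_mem (g n : Int) : ∀ (f : Nat) (j y : Int),
    y ∈ pvStrideIdx g n f j → y % g = j % g := by
  intro f
  induction f with
  | zero => intro j y h; simp [pvStrideIdx] at h
  | succ f ih =>
    intro j y h
    simp only [pvStrideIdx] at h
    split at h
    · rcases List.mem_cons.mp h with h | h
      · rw [h]
      · rw [ih _ _ h, pv_add_emod]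
    · simp at h

-- growing the bound by one appends b exactly to the progression of b's class
theorem pvStrideIdx_succ (g b : Int) (hg : 1 ≤ g) : ∀ (f₁ f₂ : Nat) (j : Int),
    (b + 1 - j).toNat ≤ f₁ → (b - j).toNat ≤ f₂ →
    pvStrideIdx g (b + 1) f₁ j = pvStrideIdx g b f₂ j ++ (if j ≤ b ∧ (b - j) % g = 0 then [b] else []) := by
  intro f₁
  induction f₁ with
  | zero =>
    intro f₂ j h₁ _
    have hj : ¬ j < b + 1 := by omega
    have hj' : ¬ j ≤ b := by omega
    rw [pvStrideIdx_nil g _ _ _ hj, pvStrideIdx_nil g b _ _ (by omega)]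
    simp [hj']
  | succ f₁ ih =>
    intro f₂ j h₁ h₂
    by_cases hlt : j < b
    · obtain ⟨f₂', rfl⟩ : ∃ f₂', f₂ = f₂' + 1 := ⟨f₂ - 1, by omega⟩
      have h1 : j < b + 1 := by omega
      rw [show pvStrideIdx g (b + 1) (f₁ + 1) j = j :: pvStrideIdx g (b + 1) f₁ (j + g) from by
            simp [pvStrideIdx, h1],
          show pvStrideIdx g b (f₂' + 1) j = j :: pvStrideIdx g b f₂' (j + g) from by
            simp [pvStrideIdx, hlt],
          ih f₂' (j + g) (by omega) (by omega)]
      have hcond : ((j + g ≤ b ∧ (b - (j + g)) % g = 0) ↔ (j ≤ b ∧ (b - j) % g = 0)) := by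
        constructor
        · rintro ⟨hle, hmod⟩
          refine ⟨by omega, ?_⟩
          rw [← pv_sub_emod (b - j) g]
          have : b - j - g = b - (j + g) := by ring
          rw [this, hmod]
        · rintro ⟨_, hmod⟩
          have hdvd : g ∣ (b - j) := Int.dvd_of_emod_eq_zero hmod
          have hge : g ≤ b - j := Int.le_of_dvd (by omega) hdvd
          refine ⟨by omega, ?_⟩
          rw [show b - (j + g) = b - j - g by ring, pv_sub_emod, hmod]
      simp only [List.cons_append]
      congr 2
      exact if_congr hcond rfl rfl
    · by_cases heq : j = b
      · subst heq
        have h1 : j < j + 1 := by omega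
        simp only [pvStrideIdx, h1, if_true]
        rw [pvStrideIdx_nil g _ _ _ (by omega), pvStrideIdx_nil g j _ _ (by omega)]
        simp
      · have hj : ¬ j < b + 1 := by omega
        rw [pvStrideIdx_nil g _ _ _ hj, pvStrideIdx_nil g b _ _ (by omega)]
        have : ¬ j ≤ b := by omega
        simp [this]

-- fuel-free twin used by the class-level proofs
def pvSeq (g m j : Int) : List Int :=
  if h : 1 ≤ g ∧ j < m then j :: pvSeq g m (j + g) else []
termination_by (m - j).toNat
decreasing_by omega

theorem pvSeq_eq (g m j : Int) :
    pvSeq g m j = if 1 ≤ g ∧ j < m then j :: pvSeq g m (j + g) else [] := by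
  rw [pvSeq]
  by_cases h : 1 ≤ g ∧ j < m <;> simp [h]

theorem pvSeq_nil (g m j : Int) (h : ¬ j < m) : pvSeq g m j = [] := by
  rw [pvSeq_eq]; simp [h]

theorem pvSeq_cons (g m j : Int) (hg : 1 ≤ g) (h : j < m) :
    pvSeq g m j = j :: pvSeq g m (j + g) := by
  rw [pvSeq_eq]; simp [hg, h]

theorem pvStrideIdx_eq_pvSeq (g m : Int) (hg : 1 ≤ g) : ∀ (f : Nat) (j : Int),
    (m - j).toNat ≤ f → pvStrideIdx g m f j = pvSeq g m j := by
  intro f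
  induction f with
  | zero =>
    intro j h
    rw [pvStrideIdx_nil g m _ _ (by omega), pvSeq_nil g m _ (by omega)]
  | succ f ih =>
    intro j h
    by_cases hj : j < m
    · rw [pvSeq_cons g m j hg hj]
      simp only [pvStrideIdx, hj, if_true]
      rw [ih (j + g) (by omega)]
    · rw [pvStrideIdx_nil g m _ _ hj, pvSeq_nil g m _ hj]

theorem pvSeq_mem (g m : Int) (hg : 1 ≤ g) : ∀ (j k : Int),
    k ∈ pvSeq g m j → j ≤ k ∧ k < m ∧ k % g = j % g := by
  intro j
  have hwf : ∀ (f : Nat) (j : Int), (m - j).toNat ≤ f → ∀ k, k ∈ pvSeq g m j →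
      j ≤ k ∧ k < m ∧ k % g = j % g := by
    intro f
    induction f with
    | zero => intro j hf k hk; rw [pvSeq_nil g m j (by omega)] at hk; simp at hk
    | succ f ih =>
      intro j hf k hk
      by_cases hj : j < m
      · rw [pvSeq_cons g m j hg hj] at hk
        rcases List.mem_cons.mp hk with rfl | hk
        · exact ⟨le_rfl, hj, rfl⟩
        · have := ih (j + g) (by omega) k hk
          refine ⟨by omega, this.2.1, by rw [this.2.2, pv_add_emod]⟩
      · rw [pvSeq_nil g m j hj] at hk; simp at hk
  exact hwf (m - j).toNat j le_rfl

theorem pvSeq_mem' (g m : Int) (hg : 1 ≤ g) : ∀ (j k : Int),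
    j ≤ k → k < m → k % g = j % g → k ∈ pvSeq g m j := by
  have hwf : ∀ (f : Nat) (j k : Int), (m - j).toNat ≤ f →
      j ≤ k → k < m → k % g = j % g → k ∈ pvSeq g m j := by
    intro f
    induction f with
    | zero => intro j k hf h1 h2 _; omega
    | succ f ih =>
      intro j k hf h1 h2 h3
      rw [pvSeq_cons g m j hg (by omega)]
      by_cases hjk : k = j
      · simp [hjk]
      · have hk' : j + g ≤ k := pv_class_le g k (j + g) hg (by rw [h3, pv_add_emod]) (by omega)
        exact List.mem_cons_of_mem _ (ih (j + g) k (by omega) hk' h2 (by rw [h3, pv_add_emod]))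
  intro j k
  exact hwf (m - j).toNat j k le_rfl

theorem pvSeq_append (g m mid : Int) (hg : 1 ≤ g) : ∀ (j : Int),
    j ≤ mid → mid ≤ m → mid % g = j % g →
    pvSeq g m j = pvSeq g mid j ++ pvSeq g m mid := by
  have hwf : ∀ (f : Nat) (j : Int), (mid - j).toNat ≤ f →
      j ≤ mid → mid ≤ m → mid % g = j % g →
      pvSeq g m j = pvSeq g mid j ++ pvSeq g m mid := by
    intro f
    induction f with
    | zero =>
      intro j hf h1 h2 h3
      have hjm : j = mid := by omega
      rw [hjm, pvSeq_nil g mid mid (by omega)]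
      simp
    | succ f ih =>
      intro j hf h1 h2 h3
      by_cases hjm : j = mid
      · subst hjm
        rw [pvSeq_nil g j j (by omega)]
        simp
      · have hjlt : j < mid := by omega
        rw [pvSeq_cons g m j hg (by omega), pvSeq_cons g mid j hg hjlt]
        have hstep : j + g ≤ mid := pv_class_le g mid (j + g) hg (by rw [pv_add_emod, ← h3]) (by omega)
        rw [ih (j + g) (by omega) hstep h2 (by rw [pv_add_emod]; exact h3)]
        simp
  intro j
  exact hwf (mid - j).toNat j le_rfl

theorem pvSeq_singleton (g m j : Int) (hg : 1 ≤ g) (h1 : j < m) (h2 : m ≤ j + g) :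
    pvSeq g m j = [j] := by
  rw [pvSeq_cons g m j hg h1, pvSeq_nil g m (j + g) (by omega)]

theorem pvSeq_shift (g m j : Int) : pvSeq g (m + g) (j + g) = (pvSeq g m j).map (· + g) := by
  by_cases hg : 1 ≤ g
  · have hwf : ∀ (f : Nat) (j : Int), (m - j).toNat ≤ f →
        pvSeq g (m + g) (j + g) = (pvSeq g m j).map (· + g) := by
      intro f
      induction f with
      | zero =>
        intro j hf
        rw [pvSeq_nil g (m + g) (j + g) (by omega), pvSeq_nil g m j (by omega)]
        simp
      | succ f ih =>
        intro j hf
        by_cases hj : j < m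
        · rw [pvSeq_cons g (m + g) (j + g) hg (by omega), pvSeq_cons g m j hg hj]
          simp only [List.map_cons]
          rw [ih (j + g) (by omega)]
        · rw [pvSeq_nil g (m + g) (j + g) (by omega), pvSeq_nil g m j hj]
          simp
    exact hwf (m - j).toNat j le_rfl
  · rw [pvSeq_eq g (m + g) (j + g), pvSeq_eq g m j]
    simp [hg]

theorem pvSeq_pairwise_lt (g m : Int) (hg : 1 ≤ g) : ∀ (j : Int),
    (pvSeq g m j).Pairwise (· < ·) := by
  have hwf : ∀ (f : Nat) (j : Int), (m - j).toNat ≤ f → (pvSeq g m j).Pairwise (· < ·) := by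
    intro f
    induction f with
    | zero => intro j hf; rw [pvSeq_nil g m j (by omega)]; exact List.Pairwise.nil
    | succ f ih =>
      intro j hf
      by_cases hj : j < m
      · rw [pvSeq_cons g m j hg hj]
        refine List.Pairwise.cons ?_ (ih (j + g) (by omega))
        intro y hy
        have := pvSeq_mem g m hg (j + g) y hy
        omega
      · rw [pvSeq_nil g m j hj]; exact List.Pairwise.nil
  intro j
  exact hwf (m - j).toNat j le_rfl

-- equal bounds in the gap between two consecutive class members give equal sequences
theorem pvSeq_bound_eq (g m m' : Int) (hg : 1 ≤ g) (j : Int)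
    (h1 : m ≤ m') (h2 : m' < m + g) (hmod : m' % g = j % g) :
    pvSeq g m' j = pvSeq g m j := by
  have hwf : ∀ (f : Nat) (j : Int), (m' - j).toNat ≤ f → m' % g = j % g →
      pvSeq g m' j = pvSeq g m j := by
    intro f
    induction f with
    | zero =>
      intro j hf hm
      have hj' : ¬ j < m' := by omega
      rw [pvSeq_nil g m' j hj', pvSeq_nil g m j (by omega)]
    | succ f ih =>
      intro j hf hm
      by_cases hj : j < m
      · rw [pvSeq_cons g m' j hg (by omega), pvSeq_cons g m j hg hj,
            ih (j + g) (by omega) (by rw [hm, pv_add_emod])]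
      · have hj' : ¬ j < m' := by
          intro hlt
          have : m ≤ j := by omega
          have := pv_class_le g j m' hg (by rw [hm]) (by omega)
          omega
        rw [pvSeq_nil g m' j hj', pvSeq_nil g m j hj]
  exact hwf (m' - j).toNat j le_rfl hmod

-- == exact characterisation of the inner while loop ==

theorem pvWhileA_char (g temp : Int) (hg : 1 ≤ g) :
    ∀ (f : Nat) (i : Int) (d : List Int), 0 ≤ i → i < g * f → i < (d.length : Int) →
    0 ≤ (pvWhileA g temp f i d).1 ∧
    (pvWhileA g temp f i d).1 ≤ i ∧
    (pvWhileA g temp f i d).1 % g = i % g ∧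
    ((pvWhileA g temp f i d).1 - g < 0 ∨ pvGetI d ((pvWhileA g temp f i d).1 - g) ≤ temp) ∧
    (∀ k : Int, (pvWhileA g temp f i d).1 < k → k ≤ i → k % g = i % g →
        pvGetI (pvWhileA g temp f i d).2 k = pvGetI d (k - g) ∧ temp < pvGetI d (k - g)) ∧
    (∀ k : Int, (k ≤ (pvWhileA g temp f i d).1 ∨ i < k ∨ k % g ≠ i % g) →
        pvGetI (pvWhileA g temp f i d).2 k = pvGetI d k) := by
  intro f
  induction f with
  | zero => intro i d h0 hf _; simp at hf; omega
  | succ f ih =>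
    intro i d h0 hf hlen
    simp only [pvWhileA]
    by_cases hc : 0 ≤ i - g ∧ temp < pvGetI d (i - g)
    · rw [if_pos hc]
      set d₂ := pvSetI d i (pvGetI d (i - g)) with hd₂
      have hlen₂ : d₂.length = d.length := pv_length_setI d i _
      have hsame : ∀ k : Int, k ≠ i → pvGetI d₂ k = pvGetI d k := by
        intro k hk
        rw [hd₂, pv_getI_setI]
        simp [hk]
      have hmul : (g : Int) * (f + 1) = g * f + g := by ring
      have hif : i - g < g * f := by
        have : (i : Int) < g * (f + 1) := by exact_mod_cast hf
        omega
      obtain ⟨c0, c1, c2, c3, c4, c5⟩ := ih (i - g) d₂ (by omega) hif (by omega)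
      have hmod : (i - g) % g = i % g := pv_sub_emod i g
      refine ⟨c0, by omega, by rw [c2, hmod], ?_, ?_, ?_⟩
      · rcases c3 with h | h
        · exact Or.inl h
        · right
          rw [← hsame _ (by omega)]
          exact h
      · intro k hk1 hk2 hk3
        by_cases hki : k = i
        · rw [hki]
          have hrd : pvGetI (pvWhileA g temp f (i - g) d₂).2 i = pvGetI d₂ i :=
            c5 i (Or.inr (Or.inl (by omega)))
          have h2 : pvGetI d₂ i = pvGetI d (i - g) := by
            rw [hd₂, pv_getI_setI]
            simp [h0, hlen]
          exact ⟨by rw [hrd, h2], hc.2⟩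
        · have hkle : k ≤ i - g := pv_class_le g (i - g) k hg (by rw [hmod, hk3]) (by omega)
          have := c4 k hk1 hkle (by rw [hmod, hk3])
          rw [hsame (k - g) (by omega)] at this
          exact this
      · intro k hk
        have hk₂ : k ≤ (pvWhileA g temp f (i - g) d₂).1 ∨ i - g < k ∨ k % g ≠ (i - g) % g := by
          rcases hk with h | h | h
          · exact Or.inl h
          · exact Or.inr (Or.inl (by omega))
          · exact Or.inr (Or.inr (by rw [hmod]; exact h))
        rw [c5 k hk₂]
        apply hsame
        rcases hk with h | h | h
        · omega
        · omega
        · intro he; exact h (by rw [he])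
    · rw [if_neg hc]
      push_neg at hc
      refine ⟨h0, le_rfl, rfl, ?_, ?_, ?_⟩
      · by_cases h1 : 0 ≤ i - g
        · exact Or.inr (hc h1)
        · exact Or.inl (by omega)
      · intro k hk1 hk2 _; omega
      · intro k _; rfl

-- == one gapped insertion step, seen on the residue-class subsequence ==

theorem pvBodyA_char (g c i : Int) (d : List Int) (hg : 1 ≤ g) (hc0 : 0 ≤ c) (hcg : c < g)
    (hic : i % g = c) (hci : c < i) (hlen : i < (d.length : Int))
    (hsort : List.Pairwise (· ≤ ·) ((pvSeq g i c).map (pvGetI d))) :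
    (∀ k : Int, ¬ (c ≤ k ∧ k ≤ i ∧ k % g = c) → pvGetI (pvBodyA g d i) k = pvGetI d k) ∧
    List.Pairwise (· ≤ ·) ((pvSeq g (i + g) c).map (pvGetI (pvBodyA g d i))) ∧
    ((pvSeq g (i + g) c).map (pvGetI (pvBodyA g d i))).Perm
      ((pvSeq g (i + g) c).map (pvGetI d)) := by
  have hcc : c % g = c := Int.emod_eq_of_lt hc0 hcg
  have h0i : 0 ≤ i := by omega
  have hgl : (i : Int) < g * d.length := by
    have h1 : (1 : Int) * d.length ≤ g * d.length :=
      mul_le_mul_of_nonneg_right hg (by positivity)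
    omega
  obtain ⟨w0, w1, w2, w3, w4, w5⟩ := pvWhileA_char g (pvGetI d i) hg d.length i d h0i hgl hlen
  set temp := pvGetI d i with htemp
  set i' := (pvWhileA g temp d.length i d).1 with hi'
  set w := (pvWhileA g temp d.length i d).2 with hw
  have hres : pvBodyA g d i = pvSetI w i' temp := rfl
  have hi'm : i' % g = c := by rw [w2, hic]
  have hci' : c ≤ i' := pv_mod_le g i' c hg hc0 hcg w0 hi'm
  have hwlen : w.length = d.length := pvWhileA_len g temp d.length i d
  have hgetres : ∀ k : Int, pvGetI (pvBodyA g d i) k =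
      if k = i' then temp else pvGetI w k := by
    intro k
    rw [hres, pv_getI_setI]
    by_cases hk : k = i'
    · rw [hk]
      have hl : i' < (w.length : Int) := by omega
      simp [w0, hl]
    · simp [hk]
  -- the three pieces of the class segment [c, i]
  have hsplit_new : pvSeq g (i + g) c = pvSeq g i' c ++ i' :: (pvSeq g i i').map (· + g) := by
    rw [pvSeq_append g (i + g) i' hg c hci' (by omega) (by rw [hi'm, hcc]),
        pvSeq_cons g (i + g) i' hg (by omega), pvSeq_shift g i i']
  have hsplit_old : pvSeq g i c = pvSeq g i' c ++ pvSeq g i i' := by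
    rw [pvSeq_append g i i' hg c hci' w1 (by rw [hi'm, hcc])]
  have hsplit_tot : pvSeq g (i + g) c = pvSeq g i c ++ [i] := by
    rw [pvSeq_append g (i + g) i hg c (by omega) (by omega) (by rw [hic, hcc]),
        pvSeq_singleton g (i + g) i hg (by omega) (by omega)]
  -- values on the three pieces
  have hval_lo : ∀ k ∈ pvSeq g i' c, pvGetI (pvBodyA g d i) k = pvGetI d k := by
    intro k hk
    obtain ⟨hk1, hk2, hk3⟩ := pvSeq_mem g i' hg c k hk
    rw [hgetres, if_neg (by omega)]
    exact w5 k (Or.inl (by omega))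
  have hval_mid : pvGetI (pvBodyA g d i) i' = temp := by rw [hgetres]; simp
  have hval_hi : ∀ k ∈ pvSeq g i i', pvGetI (pvBodyA g d i) (k + g) = pvGetI d k ∧ temp < pvGetI d k := by
    intro k hk
    obtain ⟨hk1, hk2, hk3⟩ := pvSeq_mem g i hg i' k hk
    have hkgi : k + g ≤ i := by
      have := pv_class_le g i (k + g) hg (by rw [pv_add_emod, hk3, w2]) (by omega)
      omega
    have := w4 (k + g) (by omega) hkgi (by rw [pv_add_emod, hk3, w2])
    rw [hgetres, if_neg (by omega)]
    simpa using this
  -- rewrite the new extraction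
  have hmap_lo : (pvSeq g i' c).map (pvGetI (pvBodyA g d i)) = (pvSeq g i' c).map (pvGetI d) :=
    List.map_congr_left hval_lo
  have hmap_hi : ((pvSeq g i i').map (· + g)).map (pvGetI (pvBodyA g d i))
      = (pvSeq g i i').map (pvGetI d) := by
    rw [List.map_map]
    exact List.map_congr_left (fun k hk => (hval_hi k hk).1)
  have hnew : (pvSeq g (i + g) c).map (pvGetI (pvBodyA g d i))
      = (pvSeq g i' c).map (pvGetI d) ++ temp :: (pvSeq g i i').map (pvGetI d) := by
    rw [hsplit_new]
    simp only [List.map_append, List.map_cons]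
    rw [hmap_lo, hval_mid, hmap_hi]
  have hold : (pvSeq g (i + g) c).map (pvGetI d)
      = ((pvSeq g i' c).map (pvGetI d) ++ (pvSeq g i i').map (pvGetI d)) ++ [temp] := by
    rw [hsplit_tot, hsplit_old]
    simp [htemp]
  have hsort' : List.Pairwise (· ≤ ·)
      ((pvSeq g i' c).map (pvGetI d) ++ (pvSeq g i i').map (pvGetI d)) := by
    rw [hsplit_old] at hsort
    simpa using hsort
  obtain ⟨hsA, hsB, hsAB⟩ := List.pairwise_append.mp hsort'
  -- every element of the low part is ≤ temp
  have hlo_le : ∀ a ∈ (pvSeq g i' c).map (pvGetI d), a ≤ temp := by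
    intro a ha
    rcases List.mem_map.mp ha with ⟨k, hk, rfl⟩
    obtain ⟨hk1, hk2, hk3⟩ := pvSeq_mem g i' hg c k hk
    -- the low part is nonempty, so i' > c and the loop stopped on d[i'-g] ≤ temp
    have hci'' : c < i' := by omega
    have hstep : c + g ≤ i' := pv_class_le g i' (c + g) hg (by rw [pv_add_emod, hi'm, hcc]) (by omega)
    have hstop : pvGetI d (i' - g) ≤ temp := by
      rcases w3 with h | h
      · omega
      · exact h
    have hlast : pvSeq g i' c = pvSeq g (i' - g) c ++ [i' - g] := by
      rw [pvSeq_append g i' (i' - g) hg c (by omega) (by omega) (by rw [pv_sub_emod, hi'm, hcc]),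
          pvSeq_singleton g i' (i' - g) hg (by omega) (by omega)]
    rw [hlast] at hsA hk
    rcases List.mem_append.mp hk with hk' | hk'
    · have hp := List.pairwise_append.mp (by simpa using hsA)
      have := hp.2.2 (pvGetI d k) (List.mem_map_of_mem hk') (pvGetI d (i' - g)) (by simp)
      exact le_trans this hstop
    · simp at hk'
      rw [hk']
      exact hstop
  have hhi_gt : ∀ b ∈ (pvSeq g i i').map (pvGetI d), temp ≤ b := by
    intro b hb
    rcases List.mem_map.mp hb with ⟨k, hk, rfl⟩
    exact le_of_lt (hval_hi k hk).2
  refine ⟨?_, ?_, ?_⟩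
  · -- untouched positions
    intro k hk
    rw [hgetres, if_neg (by
      intro he; subst he
      exact hk ⟨hci', w1, hi'm⟩)]
    apply w5
    by_cases hkc : k % g = c
    · rcases (by omega : k < c ∨ i < k) with h | h
      · exact Or.inl (by omega)
      · exact Or.inr (Or.inl h)
    · exact Or.inr (Or.inr (by rw [hic]; exact hkc))
  · -- sortedness of the new class segment
    rw [hnew]
    rw [List.pairwise_append]
    refine ⟨hsA, ?_, ?_⟩
    · refine List.Pairwise.cons ?_ hsB
      intro b hb; exact hhi_gt b hb
    · intro a ha b hb
      rcases List.mem_cons.mp hb with rfl | hb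
      · exact hlo_le a ha
      · exact le_trans (hlo_le a ha) (hhi_gt b hb)
  · -- permutation with the old class segment
    rw [hnew, hold]
    refine List.Perm.trans List.perm_middle ?_
    exact (List.perm_append_singleton _ _).symm

-- == one full insertion sort over a residue class ==

theorem pv_class_aux (g c n : Int) (hg : 1 ≤ g) (hc0 : 0 ≤ c) (hcg : c < g) :
    ∀ (f : Nat) (j : Int) (d : List Int),
    (n - j).toNat ≤ f → j % g = c → c < j → j < n + g → n ≤ (d.length : Int) →
    List.Pairwise (· ≤ ·) ((pvSeq g j c).map (pvGetI d)) →
    (∀ k : Int, ¬ (c ≤ k ∧ k < n ∧ k % g = c) →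
        pvGetI (List.foldl (pvBodyA g) d (pvSeq g n j)) k = pvGetI d k) ∧
    List.Pairwise (· ≤ ·) ((pvSeq g n c).map (pvGetI (List.foldl (pvBodyA g) d (pvSeq g n j)))) ∧
    ((pvSeq g n c).map (pvGetI (List.foldl (pvBodyA g) d (pvSeq g n j)))).Perm
      ((pvSeq g n c).map (pvGetI d)) := by
  have hcc : c % g = c := Int.emod_eq_of_lt hc0 hcg
  intro f
  induction f with
  | zero =>
    intro j d hf hjm hcj hjn hlen hsort
    have hnj : ¬ j < n := by omega
    rw [pvSeq_nil g n j hnj]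
    have hbd : pvSeq g n c = pvSeq g j c :=
      (pvSeq_bound_eq g n j hg c (by omega) (by omega) (by rw [hjm, hcc])).symm
    rw [hbd]
    exact ⟨fun k _ => rfl, hsort, List.Perm.refl _⟩
  | succ f ih =>
    intro j d hf hjm hcj hjn hlen hsort
    by_cases hj : j < n
    · rw [pvSeq_cons g n j hg hj]
      simp only [List.foldl_cons]
      obtain ⟨b1, b2, b3⟩ := pvBodyA_char g c j d hg hc0 hcg hjm hcj (by omega) hsort
      set d' := pvBodyA g d j with hd'
      have hlen' : (d'.length : Int) = (d.length : Int) := by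
        rw [hd', pvBodyA_len]
      obtain ⟨i1, i2, i3⟩ := ih (j + g) d' (by omega) (by rw [pv_add_emod, hjm]) (by omega)
        (by omega) (by omega) b2
      have huntouched : ∀ k : Int, ¬ (c ≤ k ∧ k < n ∧ k % g = c) →
          pvGetI (List.foldl (pvBodyA g) d' (pvSeq g n (j + g))) k = pvGetI d k := by
        intro k hk
        rw [i1 k hk, b1 k (by
          intro ⟨h1, h2, h3⟩
          exact hk ⟨h1, by omega, h3⟩)]
      refine ⟨huntouched, i2, ?_⟩
      refine i3.trans ?_
      -- (pvSeq g n c).map d' ~ (pvSeq g n c).map d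
      by_cases hjg : j + g ≤ n
      · have hs : pvSeq g n c = pvSeq g (j + g) c ++ pvSeq g n (j + g) := by
          rw [pvSeq_append g n (j + g) hg c (by omega) hjg (by rw [pv_add_emod, hjm, hcc])]
        have htail : (pvSeq g n (j + g)).map (pvGetI d') = (pvSeq g n (j + g)).map (pvGetI d) := by
          apply List.map_congr_left
          intro k hk
          obtain ⟨hk1, hk2, hk3⟩ := pvSeq_mem g n hg (j + g) k hk
          exact b1 k (by omega)
        rw [hs]
        simp only [List.map_append]
        rw [htail]
        exact b3.append_right _
      · have hs : pvSeq g n c = pvSeq g (j + g) c :=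
          (pvSeq_bound_eq g n (j + g) hg c (by omega) (by omega)
            (by rw [pv_add_emod, hjm, hcc])).symm
        rw [hs]
        exact b3
    · rw [pvSeq_nil g n j hj]
      have hbd : pvSeq g n c = pvSeq g j c :=
        (pvSeq_bound_eq g n j hg c (by omega) (by omega) (by rw [hjm, hcc])).symm
      rw [hbd]
      exact ⟨fun k _ => rfl, hsort, List.Perm.refl _⟩

theorem pv_foldl_body_len (g : Int) : ∀ (l : List Int) (d : List Int),
    (List.foldl (pvBodyA g) d l).length = d.length := by
  intro l
  induction l with
  | nil => intro d; rfl
  | cons x l ih => intro d; simp only [List.foldl_cons]; rw [ih, pvBodyA_len]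

-- == writing a list back into strided positions reconstructs the target ==

theorem pv_writeback (t : List Int) : ∀ (idxs : List Int) (d : List Int),
    d.length = t.length → idxs.Nodup →
    (∀ k ∈ idxs, 0 ≤ k ∧ k < (d.length : Int)) →
    (∀ k : Int, k ∉ idxs → pvGetI t k = pvGetI d k) →
    (idxs.zip (idxs.map (pvGetI t))).foldl (fun e p => pvSetI e p.1 p.2) d = t := by
  intro idxs
  induction idxs with
  | nil =>
    intro d hlen _ _ hoff
    simp only [List.zip_nil_left, List.foldl_nil]
    exact pv_ext d t hlen (fun k => (hoff k (by simp)).symm)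
  | cons a as ih =>
    intro d hlen hnd hbnd hoff
    simp only [List.map_cons, List.zip_cons_cons, List.foldl_cons]
    set d₂ := pvSetI d a (pvGetI t a) with hd₂
    have hlen₂ : d₂.length = d.length := pv_length_setI d a _
    have hnd' := List.nodup_cons.mp hnd
    have hba := hbnd a (by simp)
    apply ih d₂ (by omega) hnd'.2
      (fun k hk => by rw [hlen₂]; exact hbnd k (by simp [hk]))
    intro k hk
    by_cases hka : k = a
    · subst hka
      rw [hd₂, pv_getI_setI]
      simp [hba.1, hba.2]
    · rw [hd₂, pv_getI_setI, if_neg (by simp [hka])]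
      exact hoff k (by simp [hka, hk])

-- == B's slice-sort-assign equals A's insertion pass over one residue class ==

theorem pv_class_slice (g n c : Int) (hg : 1 ≤ g) (hc0 : 0 ≤ c) (hcg : c < g) (hcn : c < n)
    (d : List Int) (hn : n ≤ (d.length : Int)) (F : Nat) (hF : (n - (c + g)).toNat ≤ F) :
    pvSliceSortAssign d c n g = List.foldl (pvBodyA g) d (pvStrideIdx g n F (c + g)) := by
  have hcc : c % g = c := Int.emod_eq_of_lt hc0 hcg
  have hmin : min n (d.length : Int) = n := by omega
  have hidxs : pvStrideIdx g (min n (d.length : Int)) (d.length + 1) c = pvSeq g n c := by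
    rw [hmin]
    exact pvStrideIdx_eq_pvSeq g n hg (d.length + 1) c (by omega)
  have hrhsl : pvStrideIdx g n F (c + g) = pvSeq g n (c + g) :=
    pvStrideIdx_eq_pvSeq g n hg F (c + g) hF
  set dF := List.foldl (pvBodyA g) d (pvSeq g n (c + g)) with hdF
  have hsingle : pvSeq g (c + g) c = [c] := pvSeq_singleton g (c + g) c hg (by omega) le_rfl
  obtain ⟨u1, u2, u3⟩ := pv_class_aux g c n hg hc0 hcg (n - (c + g)).toNat (c + g) d le_rfl
    (by rw [pv_add_emod, hcc]) (by omega) (by omega) hn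
    (by rw [hsingle]; simp)
  have hsorted : PySem.List.sorted ((pvSeq g n c).map (pvGetI d)) (fun x => x) false
      = (pvSeq g n c).map (pvGetI dF) := by
    apply PySem.List.sorted_id_eq_of_perm_of_pairwise
    · exact u3
    · exact u2
  unfold pvSliceSortAssign
  simp only [hidxs, hrhsl, hsorted, ← hdF]
  apply pv_writeback
  · rw [hdF, pv_foldl_body_len]
  · exact (pvSeq_pairwise_lt g n hg c).nodup
  · intro k hk
    obtain ⟨hk1, hk2, hk3⟩ := pvSeq_mem g n hg c k hk
    exact ⟨by omega, by omega⟩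
  · intro k hk
    apply u1
    intro ⟨h1, h2, h3⟩
    exact hk (pvSeq_mem' g n hg c k (by omega) h2 (by rw [h3, hcc]))

-- == the reordering of A's single pass into per-class passes (from the ports' side) ==

theorem pv_foldl_flatMap (g : Int) (P : Int → List Int) : ∀ (cs : List Int) (d : List Int),
    List.foldl (fun d c => List.foldl (pvBodyA g) d (P c)) d cs
      = List.foldl (pvBodyA g) d (cs.flatMap P) := by
  intro cs
  induction cs with
  | nil => intro d; rfl
  | cons c cs ih =>
    intro d
    simp only [List.foldl_cons, List.flatMap_cons, List.foldl_append]
    exact ih _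

theorem pv_flatMap_congr (P Q : Int → List Int) : ∀ (cs : List Int),
    (∀ c ∈ cs, P c = Q c) → cs.flatMap P = cs.flatMap Q := by
  intro cs
  induction cs with
  | nil => intro _; rfl
  | cons c cs ih =>
    intro h
    simp only [List.flatMap_cons]
    rw [h c (by simp), ih (fun c' hc' => h c' (by simp [hc']))]

theorem pv_modclass (g m c : Int) (hg : 1 ≤ g) (hm : 0 ≤ m) (hc0 : 0 ≤ c) (hcg : c < g) :
    ((m - c) % g = 0 ∧ c ≤ m) ↔ c = m % g := by
  constructor
  · rintro ⟨hmod, _⟩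
    obtain ⟨k, hk⟩ := Int.dvd_of_emod_eq_zero hmod
    have h : m = c + g * k := by omega
    rw [h, Int.add_mul_emod_self_left, Int.emod_eq_of_lt hc0 hcg]
  · rintro rfl
    have h1 : m - m % g = g * (m / g) := by
      have := Int.emod_def m g
      omega
    refine ⟨by rw [h1]; exact Int.mul_emod_right g _, ?_⟩
    rcases lt_or_ge m g with h | h
    · rw [Int.emod_eq_of_lt hm h]
    · have := Int.emod_lt_of_pos m (show (0:Int) < g by omega)
      omega

theorem pv_main (g : Int) (hg : 1 ≤ g) (F : Nat) : ∀ (m : Nat), m + 1 ≤ F → ∀ (d : List Int),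
    List.foldl (pvBodyA g) d (PySem.List.pyRange g (g + m) 1)
      = List.foldl (pvBodyA g) d
          ((PySem.List.pyRange 0 (min g (m : Int)) 1).flatMap
            (fun c => pvStrideIdx g (g + m) F (c + g))) := by
  intro m
  induction m with
  | zero =>
    intro _ d
    rw [PySem.List.pyRange_one_eq_nil (by omega)]
    have h0 : min g ((0 : Nat) : Int) = 0 := by
      simp only [Nat.cast_zero]
      omega
    rw [h0, PySem.List.pyRange_one_eq_nil (by omega)]
    simp
  | succ m ih =>
    intro hF d
    have hFm : m + 1 ≤ F := by omega
    have hL : PySem.List.pyRange g (g + (↑(m + 1) : Int)) 1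
        = PySem.List.pyRange g (g + m) 1 ++ [g + m] := by
      have h : g + (↑(m + 1) : Int) = (g + m) + 1 := by push_cast; ring
      rw [h, PySem.List.pyRange_one_succ_right (by omega)]
    rw [hL, List.foldl_append, List.foldl_cons, List.foldl_nil]
    have hcs0 : 0 ≤ (m : Int) % g := Int.emod_nonneg _ (by omega)
    have hcsg : (m : Int) % g < g := Int.emod_lt_of_pos _ (by omega)
    have hcsm : (m : Int) % g ≤ (m : Int) := by
      rcases lt_or_ge (m : Int) g with h | h
      · rw [Int.emod_eq_of_lt (by omega) h]
      · omega
    have hprog : ∀ c : Int, 0 ≤ c → c < g →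
        pvStrideIdx g (g + (↑(m + 1) : Int)) F (c + g)
          = pvStrideIdx g (g + m) F (c + g) ++ (if c = (m : Int) % g then [g + m] else []) := by
      intro c hc0 hcg
      have heq : g + (↑(m + 1) : Int) = (g + m) + 1 := by push_cast; ring
      rw [heq, pvStrideIdx_succ g (g + m) hg F F (c + g) (by omega) (by omega)]
      congr 1
      have hiff : (c + g ≤ g + (m : Int) ∧ (g + (m : Int) - (c + g)) % g = 0)
          ↔ c = (m : Int) % g := by
        rw [show g + (m : Int) - (c + g) = (m : Int) - c by ring]
        constructor
        · rintro ⟨h1, h2⟩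
          exact (pv_modclass g m c hg (by omega) hc0 hcg).mp ⟨h2, by omega⟩
        · intro h
          obtain ⟨h2, h1⟩ := (pv_modclass g m c hg (by omega) hc0 hcg).mpr h
          exact ⟨by omega, h2⟩
      by_cases hc : c = (m : Int) % g
      · rw [if_pos (hiff.mpr hc), if_pos hc]
      · rw [if_neg (fun hh => hc (hiff.mp hh)), if_neg hc]
    by_cases hmg : (m : Int) < g
    · have hstar : (m : Int) % g = (m : Int) := Int.emod_eq_of_lt (by omega) hmg
      have hmin1 : min g ((↑(m + 1) : Int)) = (↑(m + 1) : Int) := by push_cast; omega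
      have hmin0 : min g ((m : Int)) = (m : Int) := by omega
      rw [hmin1]
      rw [hmin0] at ih
      have hcs : PySem.List.pyRange 0 (↑(m + 1) : Int) 1
          = PySem.List.pyRange 0 (m : Int) 1 ++ [(m : Int)] := by
        have h : (↑(m + 1) : Int) = (m : Int) + 1 := by push_cast; ring
        rw [h, PySem.List.pyRange_one_succ_right (by omega)]
      rw [hcs, List.flatMap_append, List.flatMap_cons, List.flatMap_nil, List.append_nil]
      have hsame : (PySem.List.pyRange 0 (m : Int) 1).flatMap
            (fun c => pvStrideIdx g (g + (↑(m + 1) : Int)) F (c + g))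
          = (PySem.List.pyRange 0 (m : Int) 1).flatMap
            (fun c => pvStrideIdx g (g + (m : Int)) F (c + g)) := by
        apply pv_flatMap_congr
        intro c hc
        rw [PySem.List.mem_pyRange_one] at hc
        rw [hprog c hc.1 (by omega)]
        have hne : ¬ c = (m : Int) % g := by rw [hstar]; omega
        simp [hne]
      have hnew : pvStrideIdx g (g + (↑(m + 1) : Int)) F ((m : Int) + g) = [g + m] := by
        rw [hprog (m : Int) (by omega) hmg]
        rw [pvStrideIdx_nil g _ F _ (by omega)]
        simp [hstar]
      rw [hsame, hnew, ih hFm d, List.foldl_append, List.foldl_cons, List.foldl_nil]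
    · have hmin1 : min g ((↑(m + 1) : Int)) = g := by push_cast; omega
      have hmin0 : min g ((m : Int)) = g := by omega
      rw [hmin1]
      rw [hmin0] at ih
      have hsplit : PySem.List.pyRange 0 g 1
          = PySem.List.pyRange 0 ((m : Int) % g) 1
            ++ (m : Int) % g :: PySem.List.pyRange ((m : Int) % g + 1) g 1 := by
        rw [PySem.List.pyRange_one_append 0 ((m : Int) % g) g hcs0 (by omega),
            PySem.List.pyRange_one_cons hcsg]
      rw [hsplit, List.flatMap_append, List.flatMap_cons]
      have hA : (PySem.List.pyRange 0 ((m : Int) % g) 1).flatMap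
            (fun c => pvStrideIdx g (g + (↑(m + 1) : Int)) F (c + g))
          = (PySem.List.pyRange 0 ((m : Int) % g) 1).flatMap
            (fun c => pvStrideIdx g (g + (m : Int)) F (c + g)) := by
        apply pv_flatMap_congr
        intro c hc
        rw [PySem.List.mem_pyRange_one] at hc
        rw [hprog c hc.1 (by omega)]
        have hne : ¬ c = (m : Int) % g := by omega
        simp [hne]
      have hB : (PySem.List.pyRange ((m : Int) % g + 1) g 1).flatMap
            (fun c => pvStrideIdx g (g + (↑(m + 1) : Int)) F (c + g))
          = (PySem.List.pyRange ((m : Int) % g + 1) g 1).flatMap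
            (fun c => pvStrideIdx g (g + (m : Int)) F (c + g)) := by
        apply pv_flatMap_congr
        intro c hc
        rw [PySem.List.mem_pyRange_one] at hc
        rw [hprog c (by omega) hc.2]
        have hne : ¬ c = (m : Int) % g := by omega
        simp [hne]
      have hC : pvStrideIdx g (g + (↑(m + 1) : Int)) F ((m : Int) % g + g)
          = pvStrideIdx g (g + (m : Int)) F ((m : Int) % g + g) ++ [g + m] := by
        rw [hprog ((m : Int) % g) hcs0 hcsg]
        simp
      rw [hA, hB, hC]
      have hY : ∀ y ∈ (PySem.List.pyRange ((m : Int) % g + 1) g 1).flatMap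
            (fun c => pvStrideIdx g (g + (m : Int)) F (c + g)), y % g ≠ (g + (m : Int)) % g := by
        intro y hy
        rw [List.mem_flatMap] at hy
        obtain ⟨c, hc, hyc⟩ := hy
        rw [PySem.List.mem_pyRange_one] at hc
        have h1 : y % g = c := by
          rw [pvStrideIdx_mem g _ F _ y hyc, pv_add_emod, Int.emod_eq_of_lt (by omega) hc.2]
        have h2 : (g + (m : Int)) % g = (m : Int) % g := by rw [add_comm, pv_add_emod]
        rw [h1, h2]; omega
      have hassoc : ∀ (X P Y : List Int) (a : Int),
          X ++ ((P ++ [a]) ++ Y) = (X ++ P) ++ a :: Y := by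
        intro X P Y a; simp
      rw [hassoc, List.foldl_append, List.foldl_cons, pv_foldl_middle g (g + m) _ hY,
          ← List.foldl_append, ih hFm d, hsplit, List.flatMap_append, List.flatMap_cons,
          ← List.append_assoc]

-- gap = 0: A's body is the identity
theorem pv_setI_getI_self (d : List Int) (k : Int) : pvSetI d k (pvGetI d k) = d := by
  unfold pvSetI pvGetI
  split
  · by_cases h : k.toNat < d.length
    · simp [List.getD, List.getElem?_eq_getElem h, List.set_getElem_self]
    · rw [List.set_eq_of_length_le (by omega)]
  · rfl

theorem pv_body_zero (d : List Int) (i : Int) : pvBodyA 0 d i = d := by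
  have hw : pvWhileA 0 (pvGetI d i) d.length i d = (i, d) := by
    cases hf : d.length with
    | zero => rfl
    | succ f =>
      simp only [pvWhileA]
      have h : ¬ (0 ≤ i - 0 ∧ pvGetI d i < pvGetI d (i - 0)) := by
        rintro ⟨_, hh⟩; simp at hh
      simp [h]
  unfold pvBodyA
  simp only [hw]
  exact pv_setI_getI_self d i

theorem pv_foldl_zero (l : List Int) : ∀ (d : List Int), List.foldl (pvBodyA 0) d l = d := by
  induction l with
  | nil => intro d; rfl
  | cons x l ih => intro d; simp only [List.foldl_cons]; rw [pv_body_zero]; exact ih d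

-- fold congruence under a length invariant
theorem pv_foldl_congr_len (F1 F2 : List Int → Int → List Int) (L : Nat)
    (hlen : ∀ d c, (F1 d c).length = d.length) :
    ∀ (cs : List Int) (d : List Int), d.length = L →
    (∀ d' c, c ∈ cs → d'.length = L → F1 d' c = F2 d' c) →
    List.foldl F1 d cs = List.foldl F2 d cs := by
  intro cs
  induction cs with
  | nil => intro d _ _; rfl
  | cons c cs ih =>
    intro d hd h
    simp only [List.foldl_cons]
    rw [← h d c (by simp) hd]
    exact ih (F1 d c) (by rw [hlen, hd]) (fun d' c' hc' hd' => h d' c' (by simp [hc']) hd')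

-- ===== VERDICT =====
theorem do_insertion_sort_spec : Claim_equal_do_insertion_sort := by
  intro gap n sd _ hpre
  unfold Spec_do_insertion_sort do_insertion_sort do_insertion_sort_alt
  by_cases hlt : gap < n
  · rw [if_pos hlt]
    obtain ⟨hg, hnl⟩ : 0 ≤ gap ∧ n ≤ (sd.length : Int) := by
      rcases hpre with h | h
      · exact h
      · omega
    by_cases hg0 : gap = 0
    · subst hg0
      rw [pv_foldl_zero, PySem.List.pyRange_one_eq_nil le_rfl, List.foldl_nil]
    · have hg1 : 1 ≤ gap := by omega
      set m : Nat := (n - gap).toNat with hmdef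
      have hnm : n = gap + (m : Int) := by omega
      have hm1 : (1 : Nat) ≤ m := by omega
      -- A's pass, reordered into per-class passes
      have hmain := pv_main gap hg1 (m + 1) m (by omega) sd
      have hminev : min gap ((m : Int)) = min gap (m : Int) := rfl
      -- extend the class list from min gap m to the full range 0..gap
      have hext : (PySem.List.pyRange 0 (min gap (m : Int)) 1).flatMap
            (fun c => pvStrideIdx gap (gap + (m : Int)) (m + 1) (c + gap))
          = (PySem.List.pyRange 0 gap 1).flatMap
            (fun c => pvStrideIdx gap (gap + (m : Int)) (m + 1) (c + gap)) := by
        by_cases hgm : gap ≤ (m : Int)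
        · rw [min_eq_left hgm]
        · have hmin : min gap (m : Int) = (m : Int) := by omega
          rw [hmin, PySem.List.pyRange_one_append 0 (m : Int) gap (by omega) (by omega),
              List.flatMap_append]
          have hz : (PySem.List.pyRange ((m : Int)) gap 1).flatMap
              (fun c => pvStrideIdx gap (gap + (m : Int)) (m + 1) (c + gap)) = [] := by
            rw [List.flatMap_eq_nil_iff]
            intro c hc
            rw [PySem.List.mem_pyRange_one] at hc
            exact pvStrideIdx_nil gap _ _ _ (by omega)
          rw [hz, List.append_nil]
      rw [hnm, hmain, hext, ← pv_foldl_flatMap]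
      -- now compare the two per-class folds over the same class list
      apply pv_foldl_congr_len _ _ sd.length
        (fun d c => pv_foldl_body_len gap _ d)
      · rfl
      · intro d c hc hd
        rw [PySem.List.mem_pyRange_one] at hc
        exact (pv_class_slice gap (gap + (m : Int)) c hg1 hc.1 hc.2 (by omega) d
          (by rw [hd]; omega) (m + 1) (by omega)).symm
  · rw [if_neg hlt, PySem.List.pyRange_one_eq_nil (by omega), List.foldl_nil]
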